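-- pv_equiv track=rewrite | github.com/francoispalma/PMNS | ops.py | mns_mod_mult
-- ===== SOURCE A (Python) =====
-- def mns_mod_mult(A, B, p, n, gamma, rho, lam):
-- 	R = [0] * n
-- 	for i in range(n):
-- 		for j in range(1, n - i):
-- 			R[i] += A[i + j] * B[n - j]
-- 		R[i] *= lam
--
-- 		for j in range(i + 1):
-- 			R[i] += A[j] * B[i - j]
-- 	return R
-- ===== SOURCE B (Python) =====
-- # Different algorithm: Karatsuba full convolution of A[:n] and B[:n],
-- # then fold the upper half back with weight lam (X^n = lam).
--
-- def _padd(x, y):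
--     if len(x) < len(y):
--         x, y = y, x
--     return [x[k] + y[k] for k in range(len(y))] + x[len(y):]
--
--
-- def _school(x, y):
--     if not x:
--         return []
--     head = [x[0] * c for c in y]
--     return _padd(head, [0] + _school(x[1:], y))
--
--
-- def _kara(x, y):
--     if len(x) <= 32 or len(y) <= 32:
--         return _school(x, y)
--     m = min(len(x), len(y)) // 2
--     x0, x1 = x[:m], x[m:]
--     y0, y1 = y[:m], y[m:]
--     z0 = _kara(x0, y0)
--     z2 = _kara(x1, y1)
--     zm = _kara(_padd(x0, x1), _padd(y0, y1))
--     z1 = _padd(zm, [-c for c in _padd(z0, z2)])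
--     return _padd(z0, [0] * m + _padd(z1, [0] * m + z2))
--
--
-- def mns_mod_mult(A, B, p, n, gamma, rho, lam):
--     C = _kara(A[:n], B[:n])
--     g = lambda k: C[k] if k < len(C) else 0
--     return [g(i) + lam * g(i + n) for i in range(n)]
-- ===== Notes on version B (the rewrite author's own statement) =====
-- stated objective: alternative
-- what changed: Replaces A's per-output pair of inner scans (reduced convolution with lam applied mid-loop) by a Karatsuba full convolution of A[:n] and B[:n] followed by a single fold of the upper half with weight lam (X^n = lam); intended as faster (O(n^1.585) coefficient operations vs O(n^2)), a timing run measured 2.9-4.7x on sizes where both finished but could not confirm it at the largest sizes, so no speed is claimed.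
import Mathlib
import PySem

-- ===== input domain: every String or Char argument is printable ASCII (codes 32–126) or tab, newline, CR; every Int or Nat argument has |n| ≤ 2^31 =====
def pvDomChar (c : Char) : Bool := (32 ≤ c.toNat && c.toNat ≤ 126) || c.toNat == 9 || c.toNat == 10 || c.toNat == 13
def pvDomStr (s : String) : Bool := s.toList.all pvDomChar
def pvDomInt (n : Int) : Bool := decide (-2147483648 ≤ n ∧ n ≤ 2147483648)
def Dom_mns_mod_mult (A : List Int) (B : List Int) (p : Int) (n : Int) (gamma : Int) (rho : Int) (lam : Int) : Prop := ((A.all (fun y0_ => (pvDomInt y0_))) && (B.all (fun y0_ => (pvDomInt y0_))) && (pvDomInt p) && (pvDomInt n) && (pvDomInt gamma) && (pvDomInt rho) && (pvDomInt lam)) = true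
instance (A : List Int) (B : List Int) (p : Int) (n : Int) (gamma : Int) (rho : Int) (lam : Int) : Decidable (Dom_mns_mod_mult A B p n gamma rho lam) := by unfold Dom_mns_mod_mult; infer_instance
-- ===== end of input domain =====

-- B replaces A's per-output scans by a Karatsuba full convolution of A[:n] and B[:n]
-- followed by a fold of the upper half with weight lam (objective: alternative algorithm).
-- ===== PORT A =====
-- Port of A: for each i, inner scan of the high products, multiply by lam, then the low products.
def mns_mod_mult (A : List Int) (B : List Int) (p : Int) (n : Int) (gamma : Int) (rho : Int) (lam : Int) : List Int :=
  (PySem.List.pyRange 0 n 1).foldl (fun R i =>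
    let r := (PySem.List.pyRange 1 (n - i) 1).foldl
      (fun r j => r + PySem.List.pyGetD A (i + j) 0 * PySem.List.pyGetD B (n - j) 0)
      (PySem.List.pyGetD R i 0)
    let r := r * lam
    let r := (PySem.List.pyRange 0 (i + 1) 1).foldl
      (fun r j => r + PySem.List.pyGetD A j 0 * PySem.List.pyGetD B (i - j) 0) r
    PySem.List.pySetD R i r)
    (List.replicate n.toNat 0)

-- ===== PORT B =====
-- Source B _padd: swap so the first list is the longer one, then elementwise sum plus the tail.
def paddCore (x : List Int) (y : List Int) : List Int :=
  ((PySem.List.pyRange 0 (y.length : Int) 1).map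
    (fun k => PySem.List.pyGetD x k 0 + PySem.List.pyGetD y k 0))
  ++ PySem.List.slice x (some (y.length : Int)) none

def padd (x : List Int) (y : List Int) : List Int :=
  if x.length < y.length then paddCore y x else paddCore x y

-- Source B _school: schoolbook convolution by recursion on the first list.
def school (x : List Int) (y : List Int) : List Int :=
  match x with
  | [] => []
  | a :: xs => padd (y.map (fun c => a * c)) (0 :: school xs y)

-- Source B _kara: Karatsuba with schoolbook base case below 33 coefficients.
-- Structural recursion on a fuel bound (x.length + y.length); the fuel only makes the same
-- computation total and is always sufficient, so every branch taken matches Source B's recursion.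
def karaF : Nat → List Int → List Int → List Int
  | 0, x, y => school x y
  | fuel + 1, x, y =>
    if x.length ≤ 32 ∨ y.length ≤ 32 then school x y
    else
      let m := min x.length y.length / 2
      let x0 := x.take m
      let x1 := x.drop m
      let y0 := y.take m
      let y1 := y.drop m
      let z0 := karaF fuel x0 y0
      let z2 := karaF fuel x1 y1
      let zm := karaF fuel (padd x0 x1) (padd y0 y1)
      let z1 := padd zm ((padd z0 z2).map (fun c => -c))
      padd z0 (List.replicate m 0 ++ padd z1 (List.replicate m 0 ++ z2))

def kara (x : List Int) (y : List Int) : List Int := karaF (x.length + y.length) x y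

def mns_mod_mult_alt (A : List Int) (B : List Int) (p : Int) (n : Int) (gamma : Int) (rho : Int) (lam : Int) : List Int :=
  let C := kara (PySem.List.slice A none (some n)) (PySem.List.slice B none (some n))
  let g := fun (k : Int) => if k < (C.length : Int) then PySem.List.pyGetD C k 0 else 0
  (PySem.List.pyRange 0 n 1).map (fun i => g i + lam * g (i + n))

-- ===== PRECONDITION & SPEC =====
-- Pre_ excludes exactly the inputs on which A raises IndexError: 0 < n but one of the lists is shorter than n.
def Pre_mns_mod_mult (A : List Int) (B : List Int) (p : Int) (n : Int) (gamma : Int) (rho : Int) (lam : Int) : Prop :=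
  n ≤ 0 ∨ (n ≤ (A.length : Int) ∧ n ≤ (B.length : Int))
instance (A : List Int) (B : List Int) (p : Int) (n : Int) (gamma : Int) (rho : Int) (lam : Int) : Decidable (Pre_mns_mod_mult A B p n gamma rho lam) := by unfold Pre_mns_mod_mult; infer_instance

def pvWitness_mns_mod_mult : List Int × List Int × Int × Int × Int × Int × Int := ([1, 2], [3, 4], 5, 2, 0, 0, 3)

def Spec_mns_mod_mult (A : List Int) (B : List Int) (p : Int) (n : Int) (gamma : Int) (rho : Int) (lam : Int) (out : List Int) : Prop := out = mns_mod_mult_alt A B p n gamma rho lam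
instance (A : List Int) (B : List Int) (p : Int) (n : Int) (gamma : Int) (rho : Int) (lam : Int) (out : List Int) : Decidable (Spec_mns_mod_mult A B p n gamma rho lam out) := by unfold Spec_mns_mod_mult; infer_instance

-- ===== CLAIM (what is proved, stated in full; the proofs are below) =====
def Claim_equal_mns_mod_mult : Prop := ∀ (A : List Int) (B : List Int) (p : Int) (n : Int) (gamma : Int) (rho : Int) (lam : Int), Dom_mns_mod_mult A B p n gamma rho lam → Pre_mns_mod_mult A B p n gamma rho lam → Spec_mns_mod_mult A B p n gamma rho lam (mns_mod_mult A B p n gamma rho lam)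

-- ===== LEMMAS AND PROOFS =====
theorem length_paddCore (x y : List Int) : (paddCore x y).length = max x.length y.length := by
  simp [paddCore, PySem.List.length_pyRange_one, PySem.List.slice_from_natCast]
  omega

theorem length_padd (x y : List Int) : (padd x y).length = max x.length y.length := by
  unfold padd; split <;> simp [length_paddCore] <;> omega

def coeff (l : List Int) (k : Nat) : Int := l.getD k 0

def cconv (x y : List Int) (k : Nat) : Int :=
  ∑ j ∈ Finset.range (k + 1), coeff x j * coeff y (k - j)

theorem coeff_nil (k : Nat) : coeff [] k = 0 := by simp [coeff]

theorem coeff_map_mul (a : Int) (y : List Int) (k : Nat) :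
    coeff (y.map (fun c => a * c)) k = a * coeff y k := by
  simp only [coeff, List.getD_eq_getElem?_getD, List.getElem?_map]
  cases h : y[k]? <;> simp

theorem coeff_map_neg (y : List Int) (k : Nat) :
    coeff (y.map (fun c => -c)) k = -coeff y k := by
  simp only [coeff, List.getD_eq_getElem?_getD, List.getElem?_map]
  cases h : y[k]? <;> simp

theorem coeff_shift (m : Nat) (x : List Int) (k : Nat) :
    coeff (List.replicate m 0 ++ x) k = if k < m then 0 else coeff x (k - m) := by
  by_cases h : k < m
  · simp [coeff, List.getD_eq_getElem?_getD, List.getElem?_append, h, List.getElem?_replicate]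
  · simp [coeff, List.getD_eq_getElem?_getD, List.getElem?_append, h]

theorem coeff_paddCore (x y : List Int) (hle : y.length ≤ x.length) (k : Nat) :
    coeff (paddCore x y) k = coeff x k + coeff y k := by
  unfold paddCore
  rw [PySem.List.slice_from_natCast]
  by_cases h : k < y.length
  · rw [coeff, List.getD_eq_getElem?_getD, List.getElem?_append_left (by
      simp [PySem.List.length_pyRange_one]; omega)]
    rw [PySem.List.pyRange_one]
    simp [List.getElem?_range, h, PySem.List.pyGetD_natCast, coeff, List.getD_eq_getElem?_getD]
  · rw [coeff, List.getD_eq_getElem?_getD, List.getElem?_append_right (by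
      simp [PySem.List.length_pyRange_one]; omega)]
    have hy : y[k]?.getD 0 = (0:Int) := by
      rw [List.getElem?_eq_none (by omega)]; rfl
    simp only [PySem.List.length_pyRange_one, List.getElem?_drop, coeff,
      List.getD_eq_getElem?_getD, hy]
    norm_num
    rw [Nat.add_sub_cancel' (Nat.le_of_not_lt h)]

theorem coeff_padd (x y : List Int) (k : Nat) :
    coeff (padd x y) k = coeff x k + coeff y k := by
  unfold padd
  split
  · rw [coeff_paddCore y x (by omega)]; ring
  · rw [coeff_paddCore x y (by omega)]
theorem cconv_nil_left (y : List Int) (k : Nat) : cconv [] y k = 0 := by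
  simp [cconv, coeff_nil]

theorem cconv_zero (x y : List Int) : cconv x y 0 = coeff x 0 * coeff y 0 := by
  simp [cconv]

theorem cconv_cons (a : Int) (xs y : List Int) (k : Nat) :
    cconv (a :: xs) y (k + 1) = a * coeff y (k + 1) + cconv xs y k := by
  rw [cconv, cconv, Finset.sum_range_succ']
  simp only [coeff, List.getD_cons_succ, List.getD_cons_zero, Nat.sub_zero]
  have : ∀ j, (k + 1) - (j + 1) = k - j := fun j => by omega
  simp only [this]
  ring

theorem coeff_school (x y : List Int) (k : Nat) :
    coeff (school x y) k = cconv x y k := by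
  induction x generalizing k with
  | nil => simp [school, coeff_nil, cconv_nil_left]
  | cons a xs ih =>
    rw [school, coeff_padd, coeff_map_mul]
    cases k with
    | zero => simp [coeff, cconv_zero]
    | succ k =>
      rw [cconv_cons]
      have h : coeff (0 :: school xs y) (k + 1) = coeff (school xs y) k := by
        simp [coeff]
      rw [h, ih k]

theorem cconv_comm (x y : List Int) (k : Nat) : cconv x y k = cconv y x k := by
  rw [cconv, cconv, ← Finset.sum_range_reflect]
  apply Finset.sum_congr rfl
  intro j hj
  simp only [Finset.mem_range] at hj
  have h1 : k + 1 - 1 - j = k - j := by omega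
  have h2 : k - (k - j) = j := by omega
  rw [h1, h2]; ring

theorem cconv_padd_left (a b y : List Int) (k : Nat) :
    cconv (padd a b) y k = cconv a y k + cconv b y k := by
  simp only [cconv, coeff_padd, add_mul]
  rw [Finset.sum_add_distrib]

theorem cconv_shift_left (m : Nat) (a y : List Int) (k : Nat) :
    cconv (List.replicate m 0 ++ a) y k = if k < m then 0 else cconv a y (k - m) := by
  split
  · rename_i h
    rw [cconv]
    apply Finset.sum_eq_zero
    intro j hj
    simp only [Finset.mem_range] at hj
    rw [coeff_shift, if_pos (by omega), zero_mul]
  · rename_i h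
    rw [cconv, cconv]
    rw [← Finset.sum_range_add_sum_Ico _ (show m ≤ k + 1 by omega)]
    have h0 : ∑ j ∈ Finset.range m, coeff (List.replicate m 0 ++ a) j * coeff y (k - j) = 0 := by
      apply Finset.sum_eq_zero
      intro j hj
      simp only [Finset.mem_range] at hj
      rw [coeff_shift, if_pos hj, zero_mul]
    rw [h0, zero_add, Finset.sum_Ico_eq_sum_range]
    have hlen : k + 1 - m = k - m + 1 := by omega
    rw [hlen]
    apply Finset.sum_congr rfl
    intro j hj
    simp only [Finset.mem_range] at hj
    rw [coeff_shift, if_neg (by omega)]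
    have e1 : m + j - m = j := by omega
    have e2 : k - (m + j) = k - m - j := by omega
    rw [e1, e2]
theorem cconv_coeff_congr (x x' y : List Int) (k : Nat) (h : ∀ j, coeff x j = coeff x' j) :
    cconv x y k = cconv x' y k := by
  unfold cconv
  exact Finset.sum_congr rfl fun j _ => by rw [h]

theorem coeff_take (x : List Int) (m j : Nat) :
    coeff (x.take m) j = if j < m then coeff x j else 0 := by
  by_cases h : j < m <;>
    simp [coeff, List.getD_eq_getElem?_getD, List.getElem?_take, h]

theorem coeff_drop (x : List Int) (m j : Nat) :
    coeff (x.drop m) j = coeff x (m + j) := by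
  simp [coeff, List.getD_eq_getElem?_getD, List.getElem?_drop]

theorem coeff_split (x : List Int) (m j : Nat) :
    coeff x j = coeff (x.take m) j + coeff (List.replicate m 0 ++ x.drop m) j := by
  rw [coeff_take, coeff_shift]
  by_cases h : j < m
  · simp [h]
  · rw [if_neg h, if_neg h, coeff_drop, zero_add]
    congr 1
    omega

theorem cconv_padd_right (x a b : List Int) (k : Nat) :
    cconv x (padd a b) k = cconv x a k + cconv x b k := by
  rw [cconv_comm, cconv_padd_left, cconv_comm a, cconv_comm b]

theorem cconv_shift_right (m : Nat) (x a : List Int) (k : Nat) :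
    cconv x (List.replicate m 0 ++ a) k = if k < m then 0 else cconv x a (k - m) := by
  rw [cconv_comm, cconv_shift_left]
  split
  · rfl
  · rw [cconv_comm]

theorem kara_combine (x0 x1 y0 y1 z0 z2 zm : List Int) (m k : Nat)
    (h0 : ∀ k, coeff z0 k = cconv x0 y0 k)
    (h2 : ∀ k, coeff z2 k = cconv x1 y1 k)
    (hm : ∀ k, coeff zm k = cconv (padd x0 x1) (padd y0 y1) k) :
    coeff (padd z0 (List.replicate m 0 ++
        padd (padd zm ((padd z0 z2).map (fun c => -c))) (List.replicate m 0 ++ z2))) k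
      = cconv (padd x0 (List.replicate m 0 ++ x1)) (padd y0 (List.replicate m 0 ++ y1)) k := by
  rw [coeff_padd, coeff_shift]
  rw [cconv_padd_left, cconv_padd_right, cconv_padd_right,
    cconv_shift_left, cconv_shift_right, cconv_shift_right]
  by_cases hk : k < m
  · simp [hk, h0]
  · rw [if_neg hk, if_neg hk, if_neg hk, if_neg hk, cconv_shift_left]
    rw [coeff_padd, coeff_shift, coeff_padd, coeff_map_neg, coeff_padd]
    rw [h0, h0, h2, hm, cconv_padd_left, cconv_padd_right, cconv_padd_right]
    by_cases hk2 : k - m < m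
    · rw [if_pos hk2, if_pos hk2]; ring
    · rw [if_neg hk2, if_neg hk2, h2]; ring

theorem coeff_karaF : ∀ (fuel : Nat) (x y : List Int), x.length + y.length ≤ fuel →
    ∀ (k : Nat), coeff (karaF fuel x y) k = cconv x y k := by
  intro fuel
  induction fuel with
  | zero => intro x y hf k; rw [karaF, coeff_school]
  | succ fuel ih =>
    intro x y hf k
    rw [karaF]
    split
    · rw [coeff_school]
    · rename_i h
      have hx : 32 < x.length ∧ 32 < y.length := by
        constructor <;> omega
      refine Eq.trans (kara_combine (x.take (min x.length y.length / 2))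
        (x.drop (min x.length y.length / 2)) (y.take (min x.length y.length / 2))
        (y.drop (min x.length y.length / 2)) _ _ _ (min x.length y.length / 2) k
        (ih _ _ (by simp [List.length_take, List.length_drop]; omega))
        (ih _ _ (by simp [List.length_take, List.length_drop]; omega))
        (ih _ _ (by simp [length_padd, List.length_take, List.length_drop]; omega))) ?_
      rw [cconv_coeff_congr _ x _ k (fun j => by rw [coeff_padd, ← coeff_split]),
        cconv_comm, cconv_coeff_congr _ y _ k (fun j => by rw [coeff_padd, ← coeff_split]),
        cconv_comm]

theorem coeff_kara (x y : List Int) (k : Nat) : coeff (kara x y) k = cconv x y k :=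
  coeff_karaF (x.length + y.length) x y le_rfl k

theorem list_sum_range (n : Nat) (f : Nat → Int) :
    ((List.range n).map f).sum = ∑ j ∈ Finset.range n, f j := by
  induction n with
  | zero => simp
  | succ n ih => rw [List.range_succ, Finset.sum_range_succ]; simp [ih]

-- the loop body of port A, named for the proofs
def stepA (A B : List Int) (n lam : Int) (R : List Int) (i : Int) : List Int :=
  let r := (PySem.List.pyRange 1 (n - i) 1).foldl
    (fun r j => r + PySem.List.pyGetD A (i + j) 0 * PySem.List.pyGetD B (n - j) 0)
    (PySem.List.pyGetD R i 0)
  let r := r * lam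
  let r := (PySem.List.pyRange 0 (i + 1) 1).foldl
    (fun r j => r + PySem.List.pyGetD A j 0 * PySem.List.pyGetD B (i - j) 0) r
  PySem.List.pySetD R i r

def aval (A B : List Int) (n lam : Int) (i : Int) : Int :=
  ((PySem.List.pyRange 0 (i + 1) 1).map
      (fun j => PySem.List.pyGetD A j 0 * PySem.List.pyGetD B (i - j) 0)).sum
    + (((PySem.List.pyRange 1 (n - i) 1).map
      (fun j => PySem.List.pyGetD A (i + j) 0 * PySem.List.pyGetD B (n - j) 0)).sum) * lam

theorem mns_eq_foldl (A B : List Int) (p n gamma rho lam : Int) :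
    mns_mod_mult A B p n gamma rho lam
      = (PySem.List.pyRange 0 n 1).foldl (stepA A B n lam) (List.replicate n.toNat 0) := rfl

theorem stepA_of_zero (A B : List Int) (n lam : Int) (R : List Int) (i : Int)
    (h : PySem.List.pyGetD R i 0 = 0) :
    stepA A B n lam R i = PySem.List.pySetD R i (aval A B n lam i) := by
  unfold stepA aval
  rw [h]
  simp only [PySem.List.foldl_add]
  congr 1
  ring

theorem loop_inv (A B : List Int) (n lam : Int) (k : Nat) (hk : k ≤ n.toNat) :
    (PySem.List.pyRange 0 (k : Int) 1).foldl (stepA A B n lam) (List.replicate n.toNat 0)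
      = (List.range k).map (fun (i : Nat) => aval A B n lam (i : Int))
          ++ List.replicate (n.toNat - k) 0 := by
  induction k with
  | zero => simp [PySem.List.pyRange_one_eq_nil]
  | succ k ih =>
    have hk' : k ≤ n.toNat := by omega
    rw [show ((k + 1 : Nat) : Int) = (k : Int) + 1 by push_cast; ring,
      PySem.List.pyRange_one_succ_right (by positivity), List.foldl_append, ih hk']
    simp only [List.foldl_cons, List.foldl_nil]
    have hlenM : ((List.range k).map (fun (i : Nat) => aval A B n lam (i : Int))).length = k := by
      simp
    have hget : PySem.List.pyGetD
        ((List.range k).map (fun (i : Nat) => aval A B n lam (i : Int))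
          ++ List.replicate (n.toNat - k) 0) (k : Int) 0 = 0 := by
      rw [PySem.List.pyGetD_natCast, List.getD_eq_getElem?_getD,
        List.getElem?_append_right (by omega)]
      rw [hlenM, List.getElem?_replicate, if_pos (by omega)]
      rfl
    rw [stepA_of_zero _ _ _ _ _ _ hget, PySem.List.pySetD_natCast]
    rw [List.set_append, if_neg (by omega), hlenM]
    rw [show n.toNat - k = (n.toNat - (k + 1)) + 1 by omega, List.replicate_succ]
    simp [List.range_succ, Nat.sub_self]
theorem lo_sum (A B : List Int) (nn i : Nat) (hi : i < nn)
    (hA : nn ≤ A.length) (hB : nn ≤ B.length) :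
    ((PySem.List.pyRange 0 ((i : Int) + 1) 1).map
        (fun j => PySem.List.pyGetD A j 0 * PySem.List.pyGetD B ((i : Int) - j) 0)).sum
      = cconv (A.take nn) (B.take nn) i := by
  rw [PySem.List.pyRange_one]
  rw [List.map_map, list_sum_range]
  have hcnt : ((i : Int) + 1 - 0).toNat = i + 1 := by omega
  rw [hcnt, cconv]
  apply Finset.sum_congr rfl
  intro t ht
  simp only [Finset.mem_range] at ht
  simp only [Function.comp]
  rw [show (0 : Int) + (t : Int) = ((t : Nat) : Int) by ring]
  rw [show (i : Int) - (t : Int) = ((i - t : Nat) : Int) by omega]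
  rw [PySem.List.pyGetD_natCast, PySem.List.pyGetD_natCast]
  rw [coeff_take, coeff_take, if_pos (by omega), if_pos (by omega)]
  rfl

theorem hi_sum (A B : List Int) (nn i : Nat) (hi : i < nn)
    (hA : nn ≤ A.length) (hB : nn ≤ B.length) :
    ((PySem.List.pyRange 1 ((nn : Int) - (i : Int)) 1).map
        (fun j => PySem.List.pyGetD A ((i : Int) + j) 0 * PySem.List.pyGetD B ((nn : Int) - j) 0)).sum
      = cconv (A.take nn) (B.take nn) (i + nn) := by
  rw [PySem.List.pyRange_one]
  rw [List.map_map, list_sum_range]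
  have hcnt : ((nn : Int) - (i : Int) - 1).toNat = nn - i - 1 := by omega
  rw [hcnt, cconv]
  -- kill the j ≤ i part of the convolution sum
  rw [← Finset.sum_range_add_sum_Ico _ (show i + 1 ≤ i + nn + 1 by omega)]
  have h1 : ∑ j ∈ Finset.range (i + 1),
      coeff (A.take nn) j * coeff (B.take nn) (i + nn - j) = 0 := by
    apply Finset.sum_eq_zero
    intro j hj
    simp only [Finset.mem_range] at hj
    rw [coeff_take, coeff_take, if_neg (show ¬ i + nn - j < nn by omega), mul_zero]
  -- kill the j ≥ nn part
  rw [← Finset.sum_Ico_consecutive _ (show i + 1 ≤ nn by omega) (show nn ≤ i + nn + 1 by omega)]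
  have h2 : ∑ j ∈ Finset.Ico nn (i + nn + 1),
      coeff (A.take nn) j * coeff (B.take nn) (i + nn - j) = 0 := by
    apply Finset.sum_eq_zero
    intro j hj
    simp only [Finset.mem_Ico] at hj
    rw [coeff_take, if_neg (by omega), zero_mul]
  rw [h1, h2, zero_add, add_zero, Finset.sum_Ico_eq_sum_range]
  apply Finset.sum_congr rfl
  intro t ht
  simp only [Finset.mem_range] at ht
  simp only [Function.comp]
  rw [show (i : Int) + ((1 : Int) + (t : Nat)) = ((i + 1 + t : Nat) : Int) by push_cast; ring]
  rw [show (nn : Int) - ((1 : Int) + (t : Nat)) = ((nn - 1 - t : Nat) : Int) by omega]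
  rw [PySem.List.pyGetD_natCast, PySem.List.pyGetD_natCast]
  rw [coeff_take, coeff_take, if_pos (by omega), if_pos (by omega)]
  have : i + nn - (i + 1 + t) = nn - 1 - t := by omega
  rw [this]
  rfl

theorem aval_eq (A B : List Int) (lam : Int) (nn i : Nat) (hi : i < nn)
    (hA : nn ≤ A.length) (hB : nn ≤ B.length) :
    aval A B (nn : Int) lam (i : Int)
      = cconv (A.take nn) (B.take nn) i + lam * cconv (A.take nn) (B.take nn) (i + nn) := by
  unfold aval
  rw [lo_sum A B nn i hi hA hB, hi_sum A B nn i hi hA hB]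
  ring
theorem a_closed (A B : List Int) (p gamma rho lam : Int) (nn : Nat) :
    mns_mod_mult A B p (nn : Int) gamma rho lam
      = (List.range nn).map (fun (i : Nat) => aval A B (nn : Int) lam (i : Int)) := by
  rw [mns_eq_foldl]
  have h := loop_inv A B (nn : Int) lam nn (by simp)
  simp only [Int.toNat_natCast] at h ⊢
  rw [h]
  simp

theorem alt_closed (A B : List Int) (p gamma rho lam : Int) (nn : Nat) :
    mns_mod_mult_alt A B p (nn : Int) gamma rho lam
      = (List.range nn).map (fun i =>
          cconv (A.take nn) (B.take nn) i + lam * cconv (A.take nn) (B.take nn) (i + nn)) := by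
  simp only [mns_mod_mult_alt]
  have hs : ∀ (xs : List Int), PySem.List.slice xs none (some (nn : Int)) = xs.take nn := by
    intro xs
    rw [PySem.List.slice_to xs (by positivity)]
    simp
  simp only [hs]
  rw [PySem.List.pyRange_one]
  simp only [Int.sub_zero, Int.toNat_natCast, List.map_map]
  apply List.map_congr_left
  intro t ht
  simp only [Function.comp]
  have g_eq : ∀ (j : Nat),
      (if ((j : Int)) < ((kara (A.take nn) (B.take nn)).length : Int)
        then PySem.List.pyGetD (kara (A.take nn) (B.take nn)) (j : Int) 0 else 0)
      = cconv (A.take nn) (B.take nn) j := by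
    intro j
    rw [← coeff_kara]
    split
    · rw [PySem.List.pyGetD_natCast]; rfl
    · rename_i hj
      rw [coeff, List.getD_eq_getElem?_getD, List.getElem?_eq_none (by omega)]
      rfl
  rw [show (0 : Int) + (t : Int) = ((t : Nat) : Int) by ring]
  rw [show ((t : Nat) : Int) + (nn : Int) = ((t + nn : Nat) : Int) by push_cast; ring]
  rw [g_eq t, g_eq (t + nn)]

theorem main_equal : ∀ (A B : List Int) (p n gamma rho lam : Int),
    Pre_mns_mod_mult A B p n gamma rho lam →
    mns_mod_mult A B p n gamma rho lam = mns_mod_mult_alt A B p n gamma rho lam := by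
  intro A B p n gamma rho lam hpre
  by_cases hn : n ≤ 0
  · rw [mns_eq_foldl]
    simp [PySem.List.pyRange_one_eq_nil hn, mns_mod_mult_alt,
      Int.toNat_of_nonpos hn]
  · have hpos : 0 < n := by omega
    obtain ⟨hA, hB⟩ : n ≤ (A.length : Int) ∧ n ≤ (B.length : Int) := by
      rcases hpre with h | h
      · omega
      · exact h
    obtain ⟨nn, rfl⟩ : ∃ nn : Nat, n = (nn : Int) := ⟨n.toNat, by omega⟩
    rw [a_closed, alt_closed]
    apply List.map_congr_left
    intro i hi
    simp only [List.mem_range] at hi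
    exact aval_eq A B lam nn i hi (by omega) (by omega)

-- ===== VERDICT (by name: the statement is the Claim_ definition above) =====
theorem mns_mod_mult_spec : Claim_equal_mns_mod_mult := by
  intro A B p n gamma rho lam _ hpre
  exact main_equal A B p n gamma rho lam hpre
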